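-- pv_equiv track=rewrite | github.com/roryslange/schoolCode | be 1600 python/extraCredit1/extraCreditQuestion1.py | threeRail
-- ===== SOURCE A (Python) =====
-- def threeRail(plainText):
--
--     encrypt1 = ''
--     encrypt2 = ''
--     encrypt3 = ''
--     cipherText = ''
--
--     for i in range(2, len(plainText), 3):
--         encrypt1 = encrypt1 + plainText[i]
--     for i in range(1, len(plainText), 3):
--         encrypt2 = encrypt2 + plainText[i]
--     for i in range(0, len(plainText), 3):
--         encrypt3 = encrypt3 + plainText[i]
--
--     cipherText = encrypt1 + encrypt2 + encrypt3
--     return cipherText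
-- ===== SOURCE B (Python) =====
-- def threeRail(plainText):
--     r0, r1, r2 = [], [], []
--     for i, c in enumerate(plainText):
--         if i % 3 == 0:
--             r0.append(c)
--         elif i % 3 == 1:
--             r1.append(c)
--         else:
--             r2.append(c)
--     return ''.join(r2) + ''.join(r1) + ''.join(r0)
-- ===== Notes on version B (the rewrite author's own statement) =====
-- stated objective: alternative
-- what changed: One sequential enumerate pass dispatching each character into one of three buckets by i % 3 (lists joined at the end), instead of three separate strided index scans each growing a string by concatenation.
import Mathlib
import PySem

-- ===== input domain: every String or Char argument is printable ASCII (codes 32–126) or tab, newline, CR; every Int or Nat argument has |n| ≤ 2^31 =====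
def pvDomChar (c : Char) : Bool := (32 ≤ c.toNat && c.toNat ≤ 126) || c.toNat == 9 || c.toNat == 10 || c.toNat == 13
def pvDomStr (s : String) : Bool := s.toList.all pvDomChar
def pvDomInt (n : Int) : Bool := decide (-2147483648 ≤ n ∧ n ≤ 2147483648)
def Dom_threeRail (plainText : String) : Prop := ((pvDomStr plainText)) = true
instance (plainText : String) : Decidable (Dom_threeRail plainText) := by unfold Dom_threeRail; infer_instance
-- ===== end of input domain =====

-- B does one enumerate pass dispatching characters into three buckets by i % 3,
-- replacing A's three separate strided scans; equivalence of return values is proved below.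

-- ===== PORT A =====
-- one strided loop 'for i in range(k, len(plainText), 3): acc = acc + plainText[i]'
-- (the index is always in range, so pyGetD with a dummy default is exact here)
def threeRailScan (l : List Char) (k : Int) : List Char :=
  (PySem.List.pyRange k (PySem.List.len l) 3).foldl
    (fun acc i => acc ++ [PySem.List.pyGetD l i ' ']) []

def threeRail (plainText : String) : String :=
  let l := plainText.toList
  let encrypt1 := threeRailScan l 2
  let encrypt2 := threeRailScan l 1
  let encrypt3 := threeRailScan l 0
  String.ofList (encrypt1 ++ encrypt2 ++ encrypt3)

-- ===== PORT B =====
-- single pass over enumerate(plainText), three accumulators, dispatch on i % 3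
def threeRail_alt (plainText : String) : String :=
  let r := (PySem.List.enumerate plainText.toList).foldl
    (fun (r : List Char × List Char × List Char) p =>
      if p.1 % 3 == 0 then (r.1 ++ [p.2], r.2.1, r.2.2)
      else if p.1 % 3 == 1 then (r.1, r.2.1 ++ [p.2], r.2.2)
      else (r.1, r.2.1, r.2.2 ++ [p.2]))
    ([], [], [])
  String.ofList (r.2.2 ++ r.2.1 ++ r.1)

-- ===== PRECONDITION & SPEC =====
def Spec_threeRail (plainText : String) (out : String) : Prop := out = threeRail_alt plainText
instance (plainText : String) (out : String) : Decidable (Spec_threeRail plainText out) := by unfold Spec_threeRail; infer_instance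

-- ===== CLAIM (what is proved, stated in full; the proofs are below) =====
def Claim_equal_threeRail : Prop := ∀ (plainText : String), Dom_threeRail plainText → Spec_threeRail plainText (threeRail plainText)

-- ===== LEMMAS AND PROOFS =====

-- range(k, n, 3) is exactly range(0, n) filtered to the residue class k mod 3
theorem pyRange_three_eq_filter (k : Int) (hk0 : 0 ≤ k) (hk3 : k < 3) (n : Int) :
    PySem.List.pyRange k n 3 =
      (PySem.List.pyRange 0 n 1).filter (fun j => j % 3 == k) := by
  have h3 : (0 : Int) < 3 := by norm_num
  have hpw1 : (PySem.List.pyRange k n 3).Pairwise (· < ·) := by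
    rw [PySem.List.pyRange_of_pos _ _ h3]
    refine List.Pairwise.map _ (fun a b hab => by omega) List.pairwise_lt_range
  have hpw2 : ((PySem.List.pyRange 0 n 1).filter (fun j => j % 3 == k)).Pairwise (· < ·) :=
    (PySem.List.pairwise_lt_pyRange_one 0 n).filter _
  have hmem : ∀ x, x ∈ PySem.List.pyRange k n 3 ↔
      x ∈ (PySem.List.pyRange 0 n 1).filter (fun j => j % 3 == k) := by
    intro x
    rw [List.mem_filter, PySem.List.mem_pyRange_iff_of_pos h3,
      PySem.List.mem_pyRange_one]
    simp only [beq_iff_eq]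
    omega
  have hperm : (PySem.List.pyRange k n 3).Perm
      ((PySem.List.pyRange 0 n 1).filter (fun j => j % 3 == k)) :=
    (List.perm_ext_iff_of_nodup
      (hpw1.imp ne_of_lt) (hpw2.imp ne_of_lt)).mpr hmem
  exact hperm.eq_of_pairwise
    (fun a b _ _ hab hba => absurd (lt_trans hab hba) (lt_irrefl a)) hpw1 hpw2

-- A's strided scan, as a map over the filtered index range
theorem threeRailScan_eq (l : List Char) (k : Int) (hk0 : 0 ≤ k) (hk3 : k < 3) :
    threeRailScan l k =
      (((PySem.List.pyRange 0 (PySem.List.len l) 1).filter (fun j => j % 3 == k)).map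
        (fun j => PySem.List.pyGetD l j ' ')) := by
  unfold threeRailScan
  rw [PySem.List.foldl_append_singleton_eq_map, pyRange_three_eq_filter k hk0 hk3]
  simp

-- B's fold fills each bucket with the matching filtered sub-sequence
theorem bucket_fold (ps : List (Int × Char)) (a b c : List Char) :
    ps.foldl
      (fun (r : List Char × List Char × List Char) p =>
        if p.1 % 3 == 0 then (r.1 ++ [p.2], r.2.1, r.2.2)
        else if p.1 % 3 == 1 then (r.1, r.2.1 ++ [p.2], r.2.2)
        else (r.1, r.2.1, r.2.2 ++ [p.2]))
      (a, b, c) =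
    (a ++ (ps.filter (fun p => p.1 % 3 == 0)).map (·.2),
     b ++ (ps.filter (fun p => p.1 % 3 == 1)).map (·.2),
     c ++ (ps.filter (fun p => !(p.1 % 3 == 0) && !(p.1 % 3 == 1))).map (·.2)) := by
  induction ps generalizing a b c with
  | nil => simp
  | cons p ps ih =>
    rw [List.foldl_cons]
    by_cases h0 : (p.1 % 3 == 0) = true
    · have e : p.1 % 3 = 0 := by simpa using h0
      rw [if_pos h0, ih]; simp [e]
    · by_cases h1 : (p.1 % 3 == 1) = true
      · have e : p.1 % 3 = 1 := by simpa using h1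
        rw [if_neg h0, if_pos h1, ih]; simp [e]
      · rw [if_neg h0, if_neg h1, ih]; simp [h0, h1]

-- bucket k of B equals A's k-th strided scan
theorem bucket_eq_scan (l : List Char) (k : Int) (hk0 : 0 ≤ k) (hk3 : k < 3)
    (p : Int × Char → Bool)
    (hp : ∀ j : Int, 0 ≤ j → p (j, PySem.List.pyGetD l j ' ') = (j % 3 == k)) :
    ((PySem.List.enumerate l).filter p).map (·.2) = threeRailScan l k := by
  rw [threeRailScan_eq l k hk0 hk3, PySem.List.enumerate_eq_map_pyRange l ' ',
    List.filter_map, List.map_map]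
  congr 1
  apply List.filter_congr
  intro j hj
  have hj0 : 0 ≤ j := ((PySem.List.mem_pyRange_one).mp hj).1
  exact hp j hj0

-- ===== VERDICT (by name: the statement is the Claim_ definition above) =====
theorem threeRail_spec : Claim_equal_threeRail := by
  intro plainText _
  show threeRail plainText = threeRail_alt plainText
  simp only [threeRail, threeRail_alt]
  rw [bucket_fold]
  simp only [List.nil_append]
  rw [bucket_eq_scan plainText.toList 2 (by norm_num) (by norm_num) _
      (fun j hj => by
        have hm : j % 3 = 0 ∨ j % 3 = 1 ∨ j % 3 = 2 := by omega
        rcases hm with h | h | h <;> simp [h]),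
    bucket_eq_scan plainText.toList 1 (by norm_num) (by norm_num) _ (fun j hj => rfl),
    bucket_eq_scan plainText.toList 0 (by norm_num) (by norm_num) _ (fun j hj => rfl)]
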